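-- pv_equiv track=rewrite | github.com/ericmerle3789/Collatz-Junction-Theorem | scripts/research/r62_epsilon_lite.py | compute_all_hits
-- ===== SOURCE A (Python) =====
-- def compute_c_delta(p, g, delta):
--     """c_delta = 1 + g^(2*delta) mod p."""
--     return (1 + pow(g, 2 * delta, p)) % p
--
-- def compute_d_delta(p, g, r, c_delta, dlog_table):
--     """d_delta = dlog_g(r / c_delta) mod (p-1), ou None si c_delta == 0."""
--     if c_delta == 0:
--         return None
--     inv_cd = pow(c_delta, -1, p)
--     val = (r * inv_cd) % p
--     if val in dlog_table:
--         return dlog_table[val]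
--     return None
--
-- def is_hit(d_delta, M, delta):
--     """hit(delta) ssi d_delta in [0, M - delta]."""
--     if d_delta is None:
--         return False
--     return 0 <= d_delta <= M - delta
--
-- def compute_all_hits(p, g, M, dlog_table):
--     """Pour chaque r in [1, p-1], retourne la liste des delta hits."""
--     c_deltas = []
--     for delta in range(M + 1):
--         c_deltas.append(compute_c_delta(p, g, delta))
--
--     hits_by_r = {}
--     d_deltas_by_r = {}  # r -> list of d_delta values
--     for r in range(1, p):
--         hits = []
--         d_vals = []
--         for delta in range(M + 1):
--             cd = c_deltas[delta]
--             dd = compute_d_delta(p, g, r, cd, dlog_table)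
--             d_vals.append(dd)
--             if is_hit(dd, M, delta):
--                 hits.append(delta)
--         if hits:
--             hits_by_r[r] = hits
--         d_deltas_by_r[r] = d_vals
--     return hits_by_r, d_deltas_by_r, c_deltas
-- ===== SOURCE B (Python) =====
-- def compute_all_hits(p, g, M, dlog_table):
--     """Pour chaque r in [1, p-1], retourne la liste des delta hits.
--
--     Re-implementation: instead of computing a modular inverse and a dict lookup
--     for every (r, delta) cell, scatter each dlog-table entry (value, dlog)
--     directly into row r = (value * c_delta) % p of column delta (the inverse of
--     the lookup direction r -> r * c_delta^-1); first write wins.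
--     """
--     c_deltas = [(1 + pow(g, 2 * delta, p)) % p for delta in range(M + 1)]
--
--     d_deltas_by_r = {r: [None] * (M + 1) for r in range(1, p)}
--     for delta, cd in enumerate(c_deltas):
--         if cd == 0:
--             continue
--         for val, dlog in dlog_table.items():
--             if 0 <= val < p:
--                 r = (val * cd) % p
--                 if r != 0 and d_deltas_by_r[r][delta] is None:
--                     d_deltas_by_r[r][delta] = dlog
--
--     hits_by_r = {}
--     for r in range(1, p):
--         row = d_deltas_by_r[r]
--         hits = [delta for delta, dd in enumerate(row)
--                 if dd is not None and 0 <= dd <= M - delta]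
--         if hits:
--             hits_by_r[r] = hits
--     return hits_by_r, d_deltas_by_r, c_deltas
-- ===== Notes on version B (the rewrite author's own statement) =====
-- stated objective: faster
-- what changed: Instead of computing a modular inverse pow(c_delta,-1,p) and a dict lookup for every (r, delta) cell, B scatters each dlog-table entry (value, dlog) once per delta directly into its unique target row r = (value*c_delta) % p (the inverse of the lookup direction), then derives hits in a separate pass.
import Mathlib
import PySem

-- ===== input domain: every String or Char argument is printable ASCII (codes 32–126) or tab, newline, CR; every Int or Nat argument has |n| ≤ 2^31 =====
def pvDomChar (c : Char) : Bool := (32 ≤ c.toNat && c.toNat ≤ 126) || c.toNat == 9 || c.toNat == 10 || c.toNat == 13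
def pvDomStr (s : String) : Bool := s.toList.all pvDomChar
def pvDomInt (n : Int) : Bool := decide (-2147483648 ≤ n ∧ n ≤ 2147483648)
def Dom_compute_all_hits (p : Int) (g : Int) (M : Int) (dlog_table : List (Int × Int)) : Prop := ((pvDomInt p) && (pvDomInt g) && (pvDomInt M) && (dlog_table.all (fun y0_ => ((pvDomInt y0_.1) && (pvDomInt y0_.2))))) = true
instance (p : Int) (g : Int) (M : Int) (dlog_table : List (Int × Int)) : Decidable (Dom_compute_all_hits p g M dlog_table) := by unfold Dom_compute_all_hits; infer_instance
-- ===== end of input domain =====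

-- B replaces A's per-cell modular inverse + dict lookup by scattering each dlog-table entry
-- once per delta into its unique target residue row (objective: faster, no inverse at all).

-- ===== PORT A =====
-- c_delta = (1 + pow(g, 2*delta, p)) % p ; every call site has delta >= 0, so the Nat exponent is exact
def pv_compute_c_delta (p : Int) (g : Int) (delta : Int) : Int :=
  PySem.Int.mod (1 + PySem.Int.powMod g (2 * delta).toNat p) p

-- pow(c, -1, p): exact for 0 < p with gcd(c, p) = 1 (Pre_ guarantees both at every call site):
-- Python returns the unique x in [0, p) with (c*x) % p = 1; computed here by the extended
-- Euclidean coefficient (what CPython does internally).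
def pv_pyInvMod (c : Int) (p : Int) : Int :=
  PySem.Int.mod (Nat.gcdA (PySem.Int.mod c p).toNat p.toNat) p

def pv_compute_d_delta (p : Int) (g : Int) (r : Int) (c_delta : Int) (dlog_table : List (Int × Int)) : Option Int :=
  if c_delta = 0 then none
  else
    let inv_cd := pv_pyInvMod c_delta p
    let val := PySem.Int.mod (r * inv_cd) p
    -- 'if val in dlog_table: return dlog_table[val]': first-match lookup in the assoc list
    match List.lookup val dlog_table with
    | some d => some d
    | none => none

def pv_is_hit (d_delta : Option Int) (M : Int) (delta : Int) : Bool :=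
  match d_delta with
  | none => false
  | some d => decide (0 ≤ d ∧ d ≤ M - delta)

def compute_all_hits (p : Int) (g : Int) (M : Int) (dlog_table : List (Int × Int)) : (List (Int × List Int)) × (List (Int × List (Option Int))) × List Int :=
  let c_deltas := (PySem.List.pyRange 0 (M + 1) 1).foldl
    (fun acc delta => acc ++ [pv_compute_c_delta p g delta]) []
  let st := (PySem.List.pyRange 1 p 1).foldl (fun st r =>
    let inner := (PySem.List.pyRange 0 (M + 1) 1).foldl (fun hd delta =>
      let cd := PySem.List.pyGetD c_deltas delta 0   -- c_deltas[delta]: delta in range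
      let dd := pv_compute_d_delta p g r cd dlog_table
      ((if pv_is_hit dd M delta then hd.1 ++ [delta] else hd.1), hd.2 ++ [dd])) ([], [])
    ((if inner.1 ≠ [] then st.1 ++ [(r, inner.1)] else st.1), st.2 ++ [(r, inner.2)])) ([], [])
  (st.1, st.2, c_deltas)

-- ===== PORT B =====
def compute_all_hits_alt (p : Int) (g : Int) (M : Int) (dlog_table : List (Int × Int)) : (List (Int × List Int)) × (List (Int × List (Option Int))) × List Int :=
  let c_deltas := (PySem.List.pyRange 0 (M + 1) 1).map
    (fun delta => PySem.Int.mod (1 + PySem.Int.powMod g (2 * delta).toNat p) p)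
  let rows0 : List (Int × List (Option Int)) :=
    (PySem.List.pyRange 1 p 1).map (fun r => (r, List.replicate (M + 1).toNat none))
  let rows := (PySem.List.enumerate c_deltas).foldl (fun rows dc =>
    if dc.2 = 0 then rows
    else dlog_table.foldl (fun rows vd =>
      if 0 ≤ vd.1 ∧ vd.1 < p then
        let r := PySem.Int.mod (vd.1 * dc.2) p
        -- d_deltas_by_r[r][delta] is None : delta = dc.1 >= 0 from enumerate, so .toNat is exact
        if r ≠ 0 ∧ ((List.lookup r rows).getD []).getD dc.1.toNat none = none then
          -- d_deltas_by_r[r][delta] = dlog : update the row stored at key r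
          rows.map (fun row => if row.1 = r then (r, row.2.set dc.1.toNat (some vd.2)) else row)
        else rows
      else rows) rows) rows0
  let hits_by_r := rows.foldl (fun hb row =>
    let hits := (PySem.List.enumerate row.2).filterMap (fun dv =>
      match dv.2 with
      | some d => if 0 ≤ d ∧ d ≤ M - dv.1 then some dv.1 else none
      | none => none)
    if hits ≠ [] then hb ++ [(row.1, hits)] else hb) []
  (hits_by_r, rows, c_deltas)

-- ===== PRECONDITION & SPEC =====
-- Pre_ excludes exactly the inputs where the Python A raises: pow(g, 2*delta, 0) with M >= 0
-- (ValueError: modulus 0), and, when the residue loop runs (p >= 2), any delta in [0, M] whose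
-- nonzero c_delta is not invertible mod p (pow(c_delta, -1, p) raises ValueError).
def Pre_compute_all_hits (p : Int) (g : Int) (M : Int) (dlog_table : List (Int × Int)) : Prop :=
  (0 ≤ M → p ≠ 0) ∧
  (2 ≤ p → 0 ≤ M → ∀ d ∈ Finset.range (M.toNat + 1),
    PySem.Int.mod (1 + PySem.Int.powMod g (2 * d) p) p = 0 ∨
    Int.gcd (PySem.Int.mod (1 + PySem.Int.powMod g (2 * d) p) p) p = 1)
instance (p : Int) (g : Int) (M : Int) (dlog_table : List (Int × Int)) : Decidable (Pre_compute_all_hits p g M dlog_table) := by unfold Pre_compute_all_hits; infer_instance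

def pvWitness_compute_all_hits : Int × Int × Int × (List (Int × Int)) := (7, 3, 2, [(2, 5), (4, 0)])

def Spec_compute_all_hits (p : Int) (g : Int) (M : Int) (dlog_table : List (Int × Int)) (out : (List (Int × List Int)) × (List (Int × List (Option Int))) × List Int) : Prop := out = compute_all_hits_alt p g M dlog_table
instance (p : Int) (g : Int) (M : Int) (dlog_table : List (Int × Int)) (out : (List (Int × List Int)) × (List (Int × List (Option Int))) × List Int) : Decidable (Spec_compute_all_hits p g M dlog_table out) := by unfold Spec_compute_all_hits; infer_instance

-- ===== CLAIM (what is proved, stated in full; the proofs are below) =====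
def Claim_equal_compute_all_hits : Prop := ∀ (p : Int) (g : Int) (M : Int) (dlog_table : List (Int × Int)), Dom_compute_all_hits p g M dlog_table → Pre_compute_all_hits p g M dlog_table → Spec_compute_all_hits p g M dlog_table (compute_all_hits p g M dlog_table)

-- ===== LEMMAS AND PROOFS =====

-- generic helpers
theorem pv_lookup_eq_find {β : Type} (a : Int) (t : List (Int × β)) :
    List.lookup a t = (t.find? (fun vd => vd.1 == a)).map (·.2) := by
  induction t with
  | nil => rfl
  | cons x xs ih =>
      obtain ⟨k, v⟩ := x
      by_cases h : k = a
      · simp [List.lookup, h]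
      · have h1 : (a == k) = false := by simp [Ne.symm h]
        have h2 : (k == a) = false := by simp [h]
        simp [List.lookup, h1, h2, ih, List.find?]

theorem pv_find?_congr {α : Type} (l : List α) (f g : α → Bool)
    (h : ∀ x ∈ l, f x = g x) : l.find? f = l.find? g := by
  induction l with
  | nil => rfl
  | cons x xs ih =>
      simp only [List.find?]
      rw [h x (by simp)]
      cases g x
      · exact ih fun y hy => h y (by simp [hy])
      · rfl

theorem pv_lookup_map {β : Type} (a : Int) (l : List Int) (F : Int → β) :
    List.lookup a (l.map (fun r => (r, F r))) = (l.find? (fun r => r == a)).map F := by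
  induction l with
  | nil => rfl
  | cons x xs ih =>
      by_cases h : x = a
      · simp [List.lookup, h]
      · simp only [List.map_cons, List.lookup, List.find?]
        have h1 : (x == a) = false := by simp [h]
        have h2 : (a == x) = false := by simp [Ne.symm h]
        simp [h1, h2, ih]

theorem pv_find?_beq_mem (a : Int) (l : List Int) (h : a ∈ l) :
    l.find? (fun r => r == a) = some a := by
  induction l with
  | nil => simp at h
  | cons x xs ih =>
      by_cases hx : x = a
      · simp [List.find?, hx]
      · have : (x == a) = false := by simp [hx]
        simp only [List.find?, this]
        exact ih (by aesop)

theorem pv_inv_prop (cd p : Int) (hp : 2 ≤ p) (h0 : 0 ≤ cd) (h1 : cd < p)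
    (hg : Int.gcd cd p = 1) : (cd * pv_pyInvMod cd p) % p = 1 := by
  have hpp : (0:Int) < p := by omega
  have hcd : PySem.Int.mod cd p = cd := by
    rw [PySem.Int.mod_eq_emod_of_pos hpp, Int.emod_eq_of_lt h0 h1]
  unfold pv_pyInvMod
  rw [hcd, PySem.Int.mod_eq_emod_of_pos hpp]
  set x := cd.toNat with hx
  set y := p.toNat with hy
  have hcdx : (x : Int) = cd := Int.toNat_of_nonneg h0
  have hpy : (y : Int) = p := Int.toNat_of_nonneg (by omega)
  have hgcd : Nat.gcd x y = 1 := by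
    have ex : x = cd.natAbs := by omega
    have ey : y = p.natAbs := by omega
    rw [ex, ey]; exact hg
  have hbezout : ((Nat.gcd x y : Int)) = x * Nat.gcdA x y + y * Nat.gcdB x y := Nat.gcd_eq_gcd_ab x y
  rw [hgcd] at hbezout
  push_cast at hbezout
  -- (cd * (A % p)) % p = (cd * A) % p = (1 - p * B) % p = 1
  have e1 : (cd * (Nat.gcdA x y % p)) % p = (cd * Nat.gcdA x y) % p := by
    conv_rhs => rw [Int.mul_emod]
    rw [Int.mul_emod, Int.emod_emod_of_dvd _ dvd_rfl]
  rw [e1]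
  have e2 : cd * Nat.gcdA x y = 1 + p * (-(Nat.gcdB x y)) := by
    rw [← hcdx, ← hpy] at *
    linarith [hbezout]
  rw [e2, Int.add_mul_emod_self_left, Int.emod_eq_of_lt (by omega) (by omega)]

theorem pv_val_iff (p cd r v : Int) (hp : 2 ≤ p) (hr1 : 1 ≤ r) (hr2 : r < p)
    (hinv : (cd * pv_pyInvMod cd p) % p = 1) :
    (0 ≤ v ∧ v < p ∧ (v * cd) % p = r) ↔ v = (r * pv_pyInvMod cd p) % p := by
  have hpp : (0:Int) < p := by omega
  set i := pv_pyInvMod cd p with hi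
  constructor
  · rintro ⟨h0, h1, h2⟩
    have : (r * i) % p = (v * cd * i) % p := by
      conv_lhs => rw [← h2]
      rw [Int.mul_emod, Int.emod_emod_of_dvd _ dvd_rfl, ← Int.mul_emod]
    rw [this]
    have : v * cd * i = v * (cd * i) := by ring
    rw [this, Int.mul_emod, hinv]
    rw [Int.emod_eq_of_lt h0 h1, mul_one, Int.emod_eq_of_lt h0 h1]
  · intro hv
    refine ⟨hv ▸ Int.emod_nonneg _ (by omega), hv ▸ Int.emod_lt_of_pos _ hpp, ?_⟩
    rw [hv]
    have : (r * i % p * cd) % p = (r * (cd * i)) % p := by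
      rw [Int.mul_emod, Int.emod_emod_of_dvd _ dvd_rfl, ← Int.mul_emod]
      ring_nf
    rw [this, Int.mul_emod, hinv]
    rw [Int.emod_eq_of_lt (by omega) hr2, mul_one, Int.emod_eq_of_lt (by omega) hr2]

-- first-match result of B's scatter over the table at column cd, for residue row r
def pvFM (p cd : Int) (t : List (Int × Int)) (r : Int) : Option Int :=
  (t.find? (fun vd => decide (0 ≤ vd.1) && decide (vd.1 < p) && decide (PySem.Int.mod (vd.1 * cd) p = r))).map (·.2)

-- CORE: the scatter direction inverts A's lookup direction
theorem pvFM_eq_d_delta (p g cd r : Int) (t : List (Int × Int)) (hp : 2 ≤ p)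
    (hr1 : 1 ≤ r) (hr2 : r < p) (h0 : 0 ≤ cd) (h1 : cd < p) (hcd : cd ≠ 0)
    (hg : Int.gcd cd p = 1) :
    pvFM p cd t r = pv_compute_d_delta p g r cd t := by
  have hpp : (0:Int) < p := by omega
  have hinv := pv_inv_prop cd p hp h0 h1 hg
  unfold pvFM pv_compute_d_delta
  rw [if_neg hcd]
  have hval : PySem.Int.mod (r * pv_pyInvMod cd p) p = (r * pv_pyInvMod cd p) % p :=
    PySem.Int.mod_eq_emod_of_pos hpp
  show _ = match List.lookup (PySem.Int.mod (r * pv_pyInvMod cd p) p) t with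
    | some d => some d | none => none
  rw [hval, pv_lookup_eq_find]
  rw [pv_find?_congr t _ (fun vd => vd.1 == (r * pv_pyInvMod cd p) % p) ?_]
  · cases t.find? (fun vd => vd.1 == (r * pv_pyInvMod cd p) % p) <;> rfl
  · intro vd _
    have := pv_val_iff p cd r vd.1 hp hr1 hr2 hinv
    rw [PySem.Int.mod_eq_emod_of_pos hpp]
    by_cases hv : vd.1 = (r * pv_pyInvMod cd p) % p
    · obtain ⟨b1, b2, b3⟩ := this.mpr hv
      rw [hv] at b1 b2 b3
      simp [hv, b1, b2, b3]
    · simp only [beq_iff_eq, hv, decide_false]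
      by_cases a1 : 0 ≤ vd.1
      · by_cases a2 : vd.1 < p
        · by_cases a3 : vd.1 * cd % p = r
          · exact absurd (this.mp ⟨a1, a2, a3⟩) hv
          · simp [a3, hv]
        · simp [a2, hv]
      · simp [a1, hv]

-- writes one value into row r at column k; 'none' = no write
def pvApp (row : List (Option Int)) (k : Nat) (o : Option Int) : List (Option Int) :=
  match o with
  | some d => row.set k (some d)
  | none => row

theorem pvFM_cons_of_pred_false (p cd : Int) (vd : Int × Int) (t : List (Int × Int)) (r : Int)
    (h : ¬(0 ≤ vd.1 ∧ vd.1 < p ∧ PySem.Int.mod (vd.1 * cd) p = r)) :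
    pvFM p cd (vd :: t) r = pvFM p cd t r := by
  unfold pvFM
  simp only [List.find?]
  have : (decide (0 ≤ vd.1) && decide (vd.1 < p) && decide (PySem.Int.mod (vd.1 * cd) p = r)) = false := by
    by_cases a1 : 0 ≤ vd.1
    · by_cases a2 : vd.1 < p
      · have a3 : ¬ PySem.Int.mod (vd.1 * cd) p = r := fun hc => h ⟨a1, a2, hc⟩
        simp [a3]
      · simp [a2]
    · simp [a1]
  rw [this]

theorem pvFM_cons_of_pred_true (p cd : Int) (vd : Int × Int) (t : List (Int × Int)) (r : Int)
    (h1 : 0 ≤ vd.1) (h2 : vd.1 < p) (h3 : PySem.Int.mod (vd.1 * cd) p = r) :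
    pvFM p cd (vd :: t) r = some vd.2 := by
  unfold pvFM
  simp only [List.find?]
  have : (decide (0 ≤ vd.1) && decide (vd.1 < p) && decide (PySem.Int.mod (vd.1 * cd) p = r)) = true := by
    simp [h1, h2, h3]
  rw [this]
  rfl

theorem pv_inner_scatter (p cd : Int) (hp : 0 < p) (k : Nat)
    (fRow : Int → List (Option Int))
    (hlen : ∀ r, k < (fRow r).length)
    (hnone : ∀ r, (fRow r).getD k none = none) :
    ∀ (t : List (Int × Int)) (mOpt : Int → Option Int),
    List.foldl (fun rows vd =>
      if 0 ≤ vd.1 ∧ vd.1 < p then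
        if PySem.Int.mod (vd.1 * cd) p ≠ 0 ∧ ((List.lookup (PySem.Int.mod (vd.1 * cd) p) rows).getD []).getD k none = none then
          rows.map (fun row => if row.1 = PySem.Int.mod (vd.1 * cd) p then (PySem.Int.mod (vd.1 * cd) p, row.2.set k (some vd.2)) else row)
        else rows
      else rows)
      ((PySem.List.pyRange 1 p 1).map (fun r => (r, pvApp (fRow r) k (mOpt r)))) t =
    (PySem.List.pyRange 1 p 1).map (fun r => (r, pvApp (fRow r) k ((mOpt r).or (pvFM p cd t r)))) := by
  intro t
  induction t with
  | nil =>
      intro mOpt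
      simp [pvFM]
  | cons vd t ih =>
      intro mOpt
      rw [List.foldl_cons]
      by_cases hv : 0 ≤ vd.1 ∧ vd.1 < p
      · rw [if_pos hv]
        by_cases hz : PySem.Int.mod (vd.1 * cd) p = 0
        · rw [if_neg (by simp [hz]), ih mOpt]
          refine List.map_congr_left (fun r hr => ?_)
          rw [PySem.List.mem_pyRange_one] at hr
          rw [pvFM_cons_of_pred_false _ _ _ _ _ (fun hc => by
            have := hc.2.2
            omega)]
        · have hr0b1 : 0 ≤ PySem.Int.mod (vd.1 * cd) p := PySem.Int.mod_nonneg _ hp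
          have hr0b2 : PySem.Int.mod (vd.1 * cd) p < p := PySem.Int.mod_lt _ hp
          have hmem : PySem.Int.mod (vd.1 * cd) p ∈ PySem.List.pyRange 1 p 1 := by
            rw [PySem.List.mem_pyRange_one]; omega
          have hlook : List.lookup (PySem.Int.mod (vd.1 * cd) p)
              ((PySem.List.pyRange 1 p 1).map (fun r => (r, pvApp (fRow r) k (mOpt r)))) =
              some (pvApp (fRow (PySem.Int.mod (vd.1 * cd) p)) k (mOpt (PySem.Int.mod (vd.1 * cd) p))) := by
            rw [pv_lookup_map, pv_find?_beq_mem _ _ hmem]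
            rfl
          cases hm : mOpt (PySem.Int.mod (vd.1 * cd) p) with
          | some d0 =>
              have hcell : ((List.lookup (PySem.Int.mod (vd.1 * cd) p)
                  ((PySem.List.pyRange 1 p 1).map (fun r => (r, pvApp (fRow r) k (mOpt r))))).getD []).getD k none = some d0 := by
                rw [hlook, hm]
                show ((fRow _).set k (some d0)).getD k none = some d0
                rw [List.getD, List.getElem?_set_self]
                · rfl
                · exact hlen _
              rw [if_neg (by rw [hcell]; simp), ih mOpt]
              refine List.map_congr_left (fun r hr => ?_)
              by_cases he : PySem.Int.mod (vd.1 * cd) p = r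
              · rw [← he, hm]
                rfl
              · rw [pvFM_cons_of_pred_false _ _ _ _ _ (fun hc => he hc.2.2)]
          | none =>
              have hcell : ((List.lookup (PySem.Int.mod (vd.1 * cd) p)
                  ((PySem.List.pyRange 1 p 1).map (fun r => (r, pvApp (fRow r) k (mOpt r))))).getD []).getD k none = none := by
                rw [hlook, hm]
                exact hnone _
              rw [if_pos ⟨hz, hcell⟩]
              have hmap : ((PySem.List.pyRange 1 p 1).map (fun r => (r, pvApp (fRow r) k (mOpt r)))).map
                  (fun row => if row.1 = PySem.Int.mod (vd.1 * cd) p then (PySem.Int.mod (vd.1 * cd) p, row.2.set k (some vd.2)) else row) =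
                  (PySem.List.pyRange 1 p 1).map (fun r => (r, pvApp (fRow r) k
                    (if r = PySem.Int.mod (vd.1 * cd) p then some vd.2 else mOpt r))) := by
                rw [List.map_map]
                refine List.map_congr_left (fun r hr => ?_)
                by_cases he : r = PySem.Int.mod (vd.1 * cd) p
                · subst he
                  simp only [Function.comp, if_pos rfl, hm]
                  rfl
                · simp only [Function.comp, if_neg he]
              rw [hmap, ih (fun r => if r = PySem.Int.mod (vd.1 * cd) p then some vd.2 else mOpt r)]
              refine List.map_congr_left (fun r hr => ?_)
              by_cases he : r = PySem.Int.mod (vd.1 * cd) p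
              · rw [if_pos he, he, hm, pvFM_cons_of_pred_true _ _ _ _ _ hv.1 hv.2 rfl]
                rfl
              · rw [if_neg he, pvFM_cons_of_pred_false _ _ _ _ _ (fun hc => he hc.2.2.symm)]
      · rw [if_neg hv, ih mOpt]
        refine List.map_congr_left (fun r hr => ?_)
        rw [pvFM_cons_of_pred_false _ _ _ _ _ (fun hc => hv ⟨hc.1, hc.2.1⟩)]

def pvC (p g M : Int) : List Int := (PySem.List.pyRange 0 (M + 1) 1).map (pv_compute_c_delta p g)

def pvDD (p g M : Int) (t : List (Int × Int)) (r delta : Int) : Option Int :=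
  pv_compute_d_delta p g r (PySem.List.pyGetD (pvC p g M) delta 0) t

def pvRowA (p g M : Int) (t : List (Int × Int)) (r : Int) : List (Option Int) :=
  (PySem.List.pyRange 0 (M + 1) 1).map (pvDD p g M t r)

def pvHits (p g M : Int) (t : List (Int × Int)) (r : Int) : List Int :=
  (PySem.List.pyRange 0 (M + 1) 1).filter (fun delta => pv_is_hit (pvDD p g M t r delta) M delta)

theorem pv_A_eq (p g M : Int) (t : List (Int × Int)) :
    compute_all_hits p g M t =
    (((PySem.List.pyRange 1 p 1).filter (fun r => decide (pvHits p g M t r ≠ []))).map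
        (fun r => (r, pvHits p g M t r)),
     (PySem.List.pyRange 1 p 1).map (fun r => (r, pvRowA p g M t r)),
     pvC p g M) := by
  unfold compute_all_hits
  have hC : (PySem.List.pyRange 0 (M + 1) 1).foldl
      (fun acc delta => acc ++ [pv_compute_c_delta p g delta]) [] = pvC p g M := by
    rw [PySem.List.foldl_append_singleton_eq_map]
    rfl
  rw [hC]
  have hinner : ∀ r : Int, (PySem.List.pyRange 0 (M + 1) 1).foldl (fun hd delta =>
      ((if pv_is_hit (pv_compute_d_delta p g r (PySem.List.pyGetD (pvC p g M) delta 0) t) M delta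
        then hd.1 ++ [delta] else hd.1),
        hd.2 ++ [pv_compute_d_delta p g r (PySem.List.pyGetD (pvC p g M) delta 0) t]))
      (([] : List Int), ([] : List (Option Int))) = (pvHits p g M t r, pvRowA p g M t r) := by
    intro r
    rw [PySem.List.foldl_prod_mk
      (f := fun h delta => if pv_is_hit (pv_compute_d_delta p g r (PySem.List.pyGetD (pvC p g M) delta 0) t) M delta then h ++ [delta] else h)
      (g := fun d delta => d ++ [pv_compute_d_delta p g r (PySem.List.pyGetD (pvC p g M) delta 0) t])]
    rw [PySem.List.foldl_append_if_eq_filter, PySem.List.foldl_append_singleton_eq_map]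
    rfl
  simp only [hinner]
  rw [PySem.List.foldl_prod_mk
    (f := fun hb r => if pvHits p g M t r ≠ [] then hb ++ [(r, pvHits p g M t r)] else hb)
    (g := fun db r => db ++ [(r, pvRowA p g M t r)])]
  rw [PySem.List.foldl_append_ite (p := fun r => pvHits p g M t r ≠ []) (f := fun r => (r, pvHits p g M t r)),
    PySem.List.foldl_append_singleton_eq_map]
  simp

def pvCell (p g : Int) (t : List (Int × Int)) (delta r : Int) : Option Int :=
  pv_compute_d_delta p g r (pv_compute_c_delta p g delta) t

def pvPart (p g M : Int) (t : List (Int × Int)) (s : Nat) (r : Int) : List (Option Int) :=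
  (List.range (M + 1).toNat).map (fun k => if k < s then pvCell p g t (↑k) r else none)

theorem pvPart_zero (p g M : Int) (t : List (Int × Int)) (r : Int) :
    pvPart p g M t 0 r = List.replicate (M + 1).toNat none := by
  unfold pvPart
  simp [List.map_const']

theorem pvPart_length (p g M : Int) (t : List (Int × Int)) (s : Nat) (r : Int) :
    (pvPart p g M t s r).length = (M + 1).toNat := by
  simp [pvPart]

theorem pvPart_getD_self (p g M : Int) (t : List (Int × Int)) (s : Nat) (r : Int) :
    (pvPart p g M t s r).getD s none = none := by
  unfold pvPart
  rw [List.getD]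
  by_cases h : s < (M + 1).toNat
  · rw [List.getElem?_map, List.getElem?_range h]
    simp
  · rw [List.getElem?_eq_none (by simpa using h)]
    rfl

theorem pvPart_app (p g M : Int) (t : List (Int × Int)) (s : Nat) (r : Int)
    (hs : s < (M + 1).toNat) :
    pvApp (pvPart p g M t s r) s (pvCell p g t (↑s) r) = pvPart p g M t (s + 1) r := by
  cases hc : pvCell p g t (↑s) r with
  | none =>
      show pvPart p g M t s r = pvPart p g M t (s + 1) r
      unfold pvPart
      refine List.map_congr_left (fun k hk => ?_)
      by_cases h : k = s
      · subst h
        simp [hc]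
      · simp only [show (k < s) ↔ (k < s + 1) from by omega]
  | some d =>
      show (pvPart p g M t s r).set s (some d) = pvPart p g M t (s + 1) r
      apply List.ext_getElem
      · simp [pvPart]
      · intro i h1 h2
        rw [List.getElem_set]
        have hi : i < (M + 1).toNat := by simpa [pvPart] using h2
        unfold pvPart
        rw [List.getElem_map, List.getElem_range, List.getElem_map, List.getElem_range]
        by_cases h : i = s
        · subst h
          simp [hc]
        · rw [if_neg (fun hh => h hh.symm)]
          simp only [show (i < s) ↔ (i < s + 1) from by omega]

theorem pvPart_stay (p g M : Int) (t : List (Int × Int)) (s : Nat) (r : Int)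
    (hc : pvCell p g t (↑s) r = none) :
    pvPart p g M t s r = pvPart p g M t (s + 1) r := by
  unfold pvPart
  refine List.map_congr_left (fun k hk => ?_)
  by_cases h : k = s
  · subst h
    simp [hc]
  · simp only [show (k < s) ↔ (k < s + 1) from by omega]

theorem pvApp_none (row : List (Option Int)) (k : Nat) : pvApp row k none = row := rfl

theorem pv_c_delta_nat (p g : Int) (d : Nat) :
    pv_compute_c_delta p g (↑d) = PySem.Int.mod (1 + PySem.Int.powMod g (2 * d) p) p := by
  unfold pv_compute_c_delta
  have h : ((2 : Int) * (d : Int)).toNat = 2 * d := by omega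
  rw [h]

theorem pv_cell_zero (p g : Int) (t : List (Int × Int)) (s r : Int)
    (hc : pv_compute_c_delta p g s = 0) : pvCell p g t s r = none := by
  unfold pvCell pv_compute_d_delta
  rw [hc]
  simp

theorem pv_scatter_aux (p g M : Int) (t : List (Int × Int)) (hp : 2 ≤ p) (hM : 0 ≤ M)
    (hPre : ∀ d : Nat, (d : Int) ≤ M → pv_compute_c_delta p g (↑d) = 0 ∨
      Int.gcd (pv_compute_c_delta p g (↑d)) p = 1) :
    ∀ s, s ≤ (M + 1).toNat →
    (List.range s).foldl (fun rows (k : Nat) =>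
      if pv_compute_c_delta p g (↑k) = 0 then rows
      else t.foldl (fun rows vd =>
        if 0 ≤ vd.1 ∧ vd.1 < p then
          if PySem.Int.mod (vd.1 * pv_compute_c_delta p g (↑k)) p ≠ 0 ∧
              ((List.lookup (PySem.Int.mod (vd.1 * pv_compute_c_delta p g (↑k)) p) rows).getD []).getD k none = none then
            rows.map (fun row => if row.1 = PySem.Int.mod (vd.1 * pv_compute_c_delta p g (↑k)) p then
              (PySem.Int.mod (vd.1 * pv_compute_c_delta p g (↑k)) p, row.2.set k (some vd.2)) else row)
          else rows
        else rows) rows)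
      ((PySem.List.pyRange 1 p 1).map (fun r => (r, List.replicate (M + 1).toNat none))) =
    (PySem.List.pyRange 1 p 1).map (fun r => (r, pvPart p g M t s r)) := by
  intro s
  induction s with
  | zero =>
      intro _
      simp only [List.range_zero, List.foldl_nil]
      refine List.map_congr_left (fun r _ => ?_)
      rw [pvPart_zero]
  | succ s ih =>
      intro hs
      rw [List.range_succ, List.foldl_append, ih (by omega), List.foldl_cons, List.foldl_nil]
      by_cases hc : pv_compute_c_delta p g (↑s) = 0
      · rw [if_pos hc]
        refine List.map_congr_left (fun r _ => ?_)
        rw [pvPart_stay _ _ _ _ _ _ (pv_cell_zero _ _ _ _ _ hc)]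
      · rw [if_neg hc]
        have hgcd : Int.gcd (pv_compute_c_delta p g (↑s)) p = 1 :=
          (hPre s (by omega)).resolve_left hc
        have hlen : ∀ r, s < (pvPart p g M t s r).length := by
          intro r
          rw [pvPart_length]
          omega
        have hnone : ∀ r, (pvPart p g M t s r).getD s none = none :=
          fun r => pvPart_getD_self p g M t s r
        have hinner := pv_inner_scatter p (pv_compute_c_delta p g (↑s)) (by omega) s
          (fun r => pvPart p g M t s r) hlen hnone t (fun _ => none)
        simp only [pvApp_none, Option.none_or] at hinner
        rw [hinner]
        refine List.map_congr_left (fun r hr => ?_)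
        rw [PySem.List.mem_pyRange_one] at hr
        have hc0 : 0 ≤ pv_compute_c_delta p g (↑s) := PySem.Int.mod_nonneg _ (by omega)
        have hc1 : pv_compute_c_delta p g (↑s) < p := PySem.Int.mod_lt _ (by omega)
        rw [pvFM_eq_d_delta p g _ r t hp hr.1 hr.2 hc0 hc1 hc hgcd]
        exact congrArg (fun row => (r, row)) (pvPart_app p g M t s r (by omega))

def pvHitsOf (M : Int) (row : List (Option Int)) : List Int :=
  (PySem.List.enumerate row).filterMap (fun dv =>
    match dv.2 with
    | some d => if 0 ≤ d ∧ d ≤ M - dv.1 then some dv.1 else none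
    | none => none)

theorem pv_filterMap_congr {α β : Type} (l : List α) (f g : α → Option β)
    (h : ∀ x ∈ l, f x = g x) : l.filterMap f = l.filterMap g := by
  induction l with
  | nil => rfl
  | cons x xs ih =>
      simp only [List.filterMap_cons, h x (by simp)]
      cases g x <;> simp [ih fun y hy => h y (by simp [hy])]

theorem pv_filterMap_guard {α β : Type} (l : List α) (q : α → Bool) (f : α → β) :
    l.filterMap (fun x => if q x then some (f x) else none) = (l.filter q).map f := by
  induction l with
  | nil => rfl
  | cons x xs ih =>
      cases hq : q x <;> simp [List.filterMap_cons, List.filter_cons, hq, ih]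

theorem pv_len_map_pyRange {β : Type} (a b : Int) (f : Int → β) :
    PySem.List.len ((PySem.List.pyRange a b 1).map f) = ((b - a).toNat : Int) := by
  rw [PySem.List.len_eq, List.length_map, PySem.List.length_pyRange_one]

theorem pv_enum_map_pyRange {β : Type} (M : Int) (hM : 0 ≤ M) (f : Int → β) (d : β) :
    PySem.List.enumerate ((PySem.List.pyRange 0 (M + 1) 1).map f) =
    (List.range (M + 1).toNat).map (fun (k : Nat) => ((k : Int), f (k : Int))) := by
  have hM1 : (M + 1 : Int) = (((M + 1).toNat : Nat) : Int) := by omega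
  rw [PySem.List.enumerate_eq_map_pyRange _ d, pv_len_map_pyRange]
  have h0 : ((M + 1 - 0).toNat : Int) = (((M + 1).toNat : Nat) : Int) := by omega
  rw [h0, PySem.List.pyRange_zero_natCast, List.map_map]
  refine List.map_congr_left (fun k hk => ?_)
  simp only [Function.comp]
  congr 1
  conv_lhs => rw [hM1]
  exact PySem.List.pyGetD_map_pyRange f (M + 1).toNat k d (List.mem_range.mp hk)

theorem pv_hitsOf_rowA (p g M : Int) (t : List (Int × Int)) (r : Int) (hM : 0 ≤ M) :
    pvHitsOf M (pvRowA p g M t r) = pvHits p g M t r := by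
  have hM1 : (M + 1 : Int) = (((M + 1).toNat : Nat) : Int) := by omega
  unfold pvHitsOf pvRowA pvHits
  rw [pv_enum_map_pyRange M hM _ (none : Option Int), List.filterMap_map]
  rw [pv_filterMap_congr _ _ (fun k : Nat =>
      if pv_is_hit (pvDD p g M t r (k : Int)) M (k : Int) then some ((k : Int)) else none) ?_]
  · rw [pv_filterMap_guard]
    conv_rhs => rw [hM1, PySem.List.pyRange_zero_natCast, List.filter_map]
    rfl
  · intro k _
    simp only [Function.comp]
    cases hdd : pvDD p g M t r (k : Int) with
    | none => simp [pv_is_hit]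
    | some d =>
        by_cases hq : 0 ≤ d ∧ d ≤ M - (k : Int)
        · simp [pv_is_hit, hq]
        · simp [pv_is_hit, hq]

theorem pv_B_eq (p g M : Int) (t : List (Int × Int)) (hp : 2 ≤ p) (hM : 0 ≤ M)
    (hPre : ∀ d : Nat, (d : Int) ≤ M → pv_compute_c_delta p g (↑d) = 0 ∨
      Int.gcd (pv_compute_c_delta p g (↑d)) p = 1) :
    compute_all_hits_alt p g M t =
    (((PySem.List.pyRange 1 p 1).filter (fun r => decide (pvHits p g M t r ≠ []))).map
        (fun r => (r, pvHits p g M t r)),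
     (PySem.List.pyRange 1 p 1).map (fun r => (r, pvRowA p g M t r)),
     pvC p g M) := by
  have hM1 : (M + 1 : Int) = (((M + 1).toNat : Nat) : Int) := by omega
  dsimp only [compute_all_hits_alt]
  have hCfun : (fun delta => PySem.Int.mod (1 + PySem.Int.powMod g (2 * delta).toNat p) p) =
      pv_compute_c_delta p g := rfl
  rw [hCfun]
  have hC : (PySem.List.pyRange 0 (M + 1) 1).map (pv_compute_c_delta p g) = pvC p g M := rfl
  rw [hC]
  have hEnum : PySem.List.enumerate (pvC p g M) =
      (List.range (M + 1).toNat).map (fun (k : Nat) => ((k : Int), pv_compute_c_delta p g (k : Int))) := by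
    unfold pvC
    exact pv_enum_map_pyRange M hM _ 0
  rw [hEnum, List.foldl_map]
  dsimp only
  simp only [Int.toNat_natCast]
  rw [pv_scatter_aux p g M t hp hM hPre (M + 1).toNat (by omega)]
  have hPartFinal : ∀ r : Int, pvPart p g M t (M + 1).toNat r = pvRowA p g M t r := by
    intro r
    unfold pvPart pvRowA
    conv_rhs => rw [hM1, PySem.List.pyRange_zero_natCast, List.map_map]
    refine List.map_congr_left (fun k hk => ?_)
    rw [if_pos (List.mem_range.mp hk)]
    show pvCell p g t (↑k) r = pvDD p g M t r (↑k)
    unfold pvCell pvDD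
    congr 1
    unfold pvC
    conv_rhs => rw [hM1]
    exact (PySem.List.pyGetD_map_pyRange _ _ _ _ (List.mem_range.mp hk)).symm
  simp only [hPartFinal]
  have hstep : (fun (hb : List (Int × List Int)) (row : Int × List (Option Int)) =>
      if pvHitsOf M row.2 ≠ [] then hb ++ [(row.1, pvHitsOf M row.2)] else hb) =
      (fun hb row =>
        if (PySem.List.enumerate row.2).filterMap (fun dv =>
            match dv.2 with
            | some d => if 0 ≤ d ∧ d ≤ M - dv.1 then some dv.1 else none
            | none => none) ≠ [] then
          hb ++ [(row.1, (PySem.List.enumerate row.2).filterMap (fun dv =>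
            match dv.2 with
            | some d => if 0 ≤ d ∧ d ≤ M - dv.1 then some dv.1 else none
            | none => none))]
        else hb) := rfl
  rw [← hstep]
  rw [PySem.List.foldl_append_ite (p := fun row : Int × List (Option Int) => pvHitsOf M row.2 ≠ [])
    (f := fun row : Int × List (Option Int) => (row.1, pvHitsOf M row.2))]
  rw [List.nil_append, List.filter_map, List.map_map]
  rw [List.filter_congr (q := fun r : Int => decide (pvHits p g M t r ≠ []))
    (fun r _ => by simp [Function.comp, pv_hitsOf_rowA p g M t r hM])]
  refine congrArg₂ Prod.mk ?_ rfl
  refine List.map_congr_left (fun r hr => ?_)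
  simp [Function.comp, pv_hitsOf_rowA p g M t r hM]

theorem pv_foldl_fixed {α β : Type} (l : List β) (f : List α → β → List α)
    (h : ∀ x, f [] x = []) : l.foldl f [] = [] := by
  induction l with
  | nil => rfl
  | cons x xs ih => rw [List.foldl_cons, h]; exact ih

-- ===== VERDICT (by name: the statement is the Claim_ definition above) =====
theorem compute_all_hits_spec : Claim_equal_compute_all_hits := by
  intro p g M t hDom hPre
  unfold Spec_compute_all_hits
  obtain ⟨hP0, hPg⟩ := hPre
  rw [pv_A_eq]
  by_cases hp : 2 ≤ p
  · by_cases hM : 0 ≤ M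
    · rw [pv_B_eq p g M t hp hM ?_]
      intro d hd
      rw [pv_c_delta_nat]
      exact hPg hp hM d (Finset.mem_range.mpr (by omega))
    · -- M < 0: no deltas at all; every row is empty on both sides
      have hds : PySem.List.pyRange 0 (M + 1) 1 = [] := PySem.List.pyRange_one_eq_nil (by omega)
      have hn0 : (M + 1).toNat = 0 := by omega
      dsimp only [compute_all_hits_alt]
      rw [hds, hn0]
      simp only [List.map_nil, PySem.List.enumerate_nil, List.foldl_nil, List.replicate_zero]
      rw [List.foldl_map]
      simp [pvC, pvRowA, pvHits, hds, PySem.List.enumerate_nil]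
  · -- p <= 1: there are no residues r in [1, p); both sides collapse to ([], [], c_deltas)
    have hrs : PySem.List.pyRange 1 p 1 = [] := PySem.List.pyRange_one_eq_nil (by omega)
    have houter : ∀ (e : List (Int × Int)),
        List.foldl (fun rows (dc : Int × Int) =>
          if dc.2 = 0 then rows
          else List.foldl (fun rows vd =>
            if 0 ≤ vd.1 ∧ vd.1 < p then
              if PySem.Int.mod (vd.1 * dc.2) p ≠ 0 ∧
                  ((List.lookup (PySem.Int.mod (vd.1 * dc.2) p) rows).getD []).getD dc.1.toNat none = none then
                rows.map (fun row => if row.1 = PySem.Int.mod (vd.1 * dc.2) p then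
                  (PySem.Int.mod (vd.1 * dc.2) p, row.2.set dc.1.toNat (some vd.2)) else row)
              else rows
            else rows) rows t)
          ([] : List (Int × List (Option Int))) e = [] := by
      intro e
      apply pv_foldl_fixed
      intro dc
      split_ifs with h1
      · rfl
      · exact pv_foldl_fixed _ _ (fun vd => by split_ifs <;> rfl)
    dsimp only [compute_all_hits_alt]
    rw [hrs]
    simp only [List.map_nil]
    rw [houter, List.foldl_nil]
    simp [pvC]
    intro a _ _
    rfl
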